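-- pv_equiv track=rewrite | github.com/ujos89/1day1problem | programmers/kakao/blind_2021/k1_2.py | order2course
-- ===== SOURCE A (Python) =====
-- from itertools import combinations
-- from collections import Counter
--
-- def order2course(idx_list, orders, course_dict):
--     order_all = []
--     for idx in idx_list:
--         order_all.extend(orders[idx])
--     order_count = Counter(order_all)
--
--     common_menu = []
--     for menu in order_count:
--         if order_count[menu] >= 2:
--             common_menu.append(menu)
--     common_menu = sorted(common_menu)
--
--     if len(common_menu) >= 2:
--         for menu_num in course_dict:
--             for _ in list(combinations(common_menu, menu_num)):
--                 course_dict[menu_num].append(_)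
--
--     return course_dict
-- ===== SOURCE B (Python) =====
-- from itertools import combinations
--
-- # B: sort the pooled menus once and detect runs >= 2 in a single scan (the run
-- # list comes out already sorted), then rebuild the dict by a comprehension
-- # instead of mutating it in place.  Return value only: A mutates course_dict,
-- # B leaves it untouched.
--
-- def _common(pooled):
--     common = []
--     rest = pooled
--     while rest:
--         head = rest[0]
--         k = 1
--         while k < len(rest) and rest[k] == head:
--             k += 1
--         if k >= 2:
--             common.append(head)
--         rest = rest[k:]
--     return common
--
-- def order2course(idx_list, orders, course_dict):
--     pooled = sorted(m for idx in idx_list for m in orders[idx])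
--     common_menu = _common(pooled)
--     if len(common_menu) < 2:
--         return course_dict
--     return {k: v + list(combinations(common_menu, k)) for k, v in course_dict.items()}
-- ===== Notes on version B (the rewrite author's own statement) =====
-- stated objective: alternative
-- what changed: Replaces the Counter + key-filter + separate sorted() pipeline by sorting the pooled menu list once and collecting runs of length >= 2 in a single scan (already sorted), and replaces the in-place key-loop dict mutation by rebuilding the dict with a comprehension; return value only (A mutates course_dict, B does not).
-- outside the precondition, e.g. on order2course([0], [['a', 'a']], {-1: []}): A returns {-1: []}, B returns {-1: []}; on order2course([0, 0], [['a', 'b']], {-1: []}): A raises ValueError, B raises ValueError; on order2course([2], [['a']], {}): A raises IndexError, B raises IndexError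
import Mathlib
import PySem

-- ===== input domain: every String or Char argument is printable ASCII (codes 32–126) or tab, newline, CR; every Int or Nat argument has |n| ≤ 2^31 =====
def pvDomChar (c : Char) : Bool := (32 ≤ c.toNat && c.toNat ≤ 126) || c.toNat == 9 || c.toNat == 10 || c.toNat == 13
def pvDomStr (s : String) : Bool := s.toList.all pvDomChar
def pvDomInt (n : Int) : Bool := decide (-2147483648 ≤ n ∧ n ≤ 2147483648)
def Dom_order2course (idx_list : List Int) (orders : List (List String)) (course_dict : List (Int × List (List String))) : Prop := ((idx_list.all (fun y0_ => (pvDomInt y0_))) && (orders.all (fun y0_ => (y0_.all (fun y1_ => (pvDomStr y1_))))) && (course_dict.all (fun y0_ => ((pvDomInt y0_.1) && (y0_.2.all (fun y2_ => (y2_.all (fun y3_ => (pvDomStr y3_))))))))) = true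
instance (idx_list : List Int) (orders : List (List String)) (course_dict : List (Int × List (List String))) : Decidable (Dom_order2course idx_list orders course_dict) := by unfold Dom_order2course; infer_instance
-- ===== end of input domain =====

-- B sorts the pooled menu list once and collects runs of length >= 2 in one scan
-- (instead of Counter + filter + sorted) and rebuilds the dict by mapping instead of
-- mutating it key by key; equivalence is about the RETURN value only (A mutates course_dict).


-- ===== PORT A =====
def order2course (idx_list : List Int) (orders : List (List String)) (course_dict : List (Int × List (List String))) : List (Int × List (List String)) :=
  -- order_all = []; for idx in idx_list: order_all.extend(orders[idx])
  let order_all : List String := idx_list.foldl (fun acc idx => acc ++ (PySem.List.pyGet? orders idx).getD []) []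
  -- order_count = Counter(order_all)
  let order_count := PySem.Dict.counter order_all
  -- for menu in order_count: if order_count[menu] >= 2: common_menu.append(menu)
  let common_menu0 : List String := order_count.keys.foldl (fun acc menu => if 2 ≤ order_count.getD menu 0 then acc ++ [menu] else acc) []
  -- common_menu = sorted(common_menu)
  let common_menu := PySem.List.sorted common_menu0 (fun x => x) false
  if 2 ≤ common_menu.length then
    -- for menu_num in course_dict: for _ in combinations(common_menu, menu_num): course_dict[menu_num].append(_)
    ((PySem.Dict.mk course_dict).keys.foldl
        (fun d menu_num => d.modify menu_num [] (fun v => v ++ PySem.List.combinations common_menu menu_num.toNat))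
        (PySem.Dict.mk course_dict)).items
  else course_dict

-- ===== PORT B =====
-- run scanner: while rest is nonempty, count the leading run; keep its head iff the run length ≥ 2
def collectRuns : List String → List String
  | [] => []
  | x :: xs =>
    (if 2 ≤ (xs.takeWhile (· == x)).length + 1 then [x] else []) ++ collectRuns (xs.dropWhile (· == x))
termination_by l => l.length
decreasing_by simpa using Nat.lt_succ_of_le (List.length_dropWhile_le _ _)

def order2course_alt (idx_list : List Int) (orders : List (List String)) (course_dict : List (Int × List (List String))) : List (Int × List (List String)) :=
  -- pooled = sorted(m for idx in idx_list for m in orders[idx])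
  let pooled := PySem.List.sorted (idx_list.flatMap (fun idx => (PySem.List.pyGet? orders idx).getD [])) (fun x => x) false
  let common_menu := collectRuns pooled
  if common_menu.length < 2 then course_dict
  else course_dict.map (fun p => (p.1, p.2 ++ PySem.List.combinations common_menu p.1.toNat))

-- ===== PRECONDITION & SPEC =====
-- Pre_ excludes (a) out-of-range indices, on which A raises IndexError, (b) negative dict
-- keys, on which A can raise ValueError from combinations, and (c) duplicate dict keys:
-- an association list with duplicate keys does not correspond to any Python dict, so A's
-- behaviour there is representation-dependent (the Python dict collapses the duplicates).
def Pre_order2course (idx_list : List Int) (orders : List (List String)) (course_dict : List (Int × List (List String))) : Prop :=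
  (∀ i ∈ idx_list, -(orders.length : Int) ≤ i ∧ i < orders.length) ∧
  (course_dict.map Prod.fst).Nodup ∧
  (∀ p ∈ course_dict, 0 ≤ p.1)
instance (idx_list : List Int) (orders : List (List String)) (course_dict : List (Int × List (List String))) : Decidable (Pre_order2course idx_list orders course_dict) := by unfold Pre_order2course; infer_instance

def pvWitness_order2course : List Int × List (List String) × (List (Int × List (List String))) :=
  ([0, 0], [["a", "b"]], [(2, [])])

def Spec_order2course (idx_list : List Int) (orders : List (List String)) (course_dict : List (Int × List (List String))) (out : List (Int × List (List String))) : Prop := out = order2course_alt idx_list orders course_dict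
instance (idx_list : List Int) (orders : List (List String)) (course_dict : List (Int × List (List String))) (out : List (Int × List (List String))) : Decidable (Spec_order2course idx_list orders course_dict out) := by unfold Spec_order2course; infer_instance

-- ===== CLAIM (what is proved, stated in full; the proofs are below) =====
def Claim_equal_order2course : Prop := ∀ (idx_list : List Int) (orders : List (List String)) (course_dict : List (Int × List (List String))), Dom_order2course idx_list orders course_dict → Pre_order2course idx_list orders course_dict → Spec_order2course idx_list orders course_dict (order2course idx_list orders course_dict)

-- ===== LEMMAS AND PROOFS =====

-- every element kept by the run scanner occurs in the scanned list
theorem mem_of_mem_collectRuns (s : List String) (m : String) (h : m ∈ collectRuns s) : m ∈ s := by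
  induction s using collectRuns.induct with
  | case1 => simp [collectRuns] at h
  | case2 x xs ih =>
    rw [collectRuns] at h
    rcases List.mem_append.1 h with h1 | h2
    · split at h1 <;> simp at h1; simp [h1]
    · have := ih h2
      exact List.mem_cons_of_mem _ ((List.dropWhile_sublist _).mem this)

-- in a sorted list, everything surviving dropWhile (== x) is > x
theorem lt_of_mem_dropWhile (x : String) (xs : List String)
    (hp : xs.Pairwise (· ≤ ·)) (hle : ∀ z ∈ xs, x ≤ z) :
    ∀ y ∈ xs.dropWhile (· == x), x < y := by
  induction xs with
  | nil => simp
  | cons a t ih =>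
    by_cases hax : a = x
    · subst hax
      simp only [List.dropWhile_cons, BEq.rfl]
      simpa using ih hp.tail (fun z hz => hle z (List.mem_cons_of_mem _ hz))
    · have hxa : x < a := lt_of_le_of_ne (hle a (List.mem_cons_self)) (Ne.symm hax)
      rw [List.dropWhile_cons_of_neg (by simpa using hax)]
      intro y hy
      rcases List.mem_cons.1 hy with rfl | hy
      · exact hxa
      · exact lt_of_lt_of_le hxa (List.rel_of_pairwise_cons hp hy)

-- a run prefix is constant
theorem takeWhile_eq_replicate (x : String) (xs : List String) :
    xs.takeWhile (· == x) = List.replicate (xs.takeWhile (· == x)).length x := by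
  apply List.eq_replicate_of_mem
  intro b hb
  have := List.mem_takeWhile_imp hb
  simpa using this

-- the run scanner keeps exactly the elements occurring at least twice
theorem mem_collectRuns (s : List String) (hs : s.Pairwise (· ≤ ·)) (m : String) :
    m ∈ collectRuns s ↔ 2 ≤ s.count m := by
  induction s using collectRuns.induct with
  | case1 => simp [collectRuns]
  | case2 x xs ih =>
    have hle : ∀ z ∈ xs, x ≤ z := fun z hz => List.rel_of_pairwise_cons hs hz
    have hgt := lt_of_mem_dropWhile x xs hs.tail hle
    have hxnot : x ∉ xs.dropWhile (· == x) := fun hmem => lt_irrefl x (hgt x hmem)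
    have hsorted' : (xs.dropWhile (· == x)).Pairwise (· ≤ ·) :=
      hs.tail.sublist (List.dropWhile_sublist _)
    have ihs := ih hsorted'
    have hcount : ∀ c : String, List.count c xs
        = List.count c (xs.takeWhile (· == x)) + List.count c (xs.dropWhile (· == x)) := by
      intro c
      conv_lhs => rw [← List.takeWhile_append_dropWhile (p := (· == x)) (l := xs)]
      exact List.count_append
    rw [collectRuns]
    by_cases hmx : m = x
    · subst hmx
      have hcx : List.count m xs = (xs.takeWhile (· == m)).length := by
        rw [hcount m, List.count_eq_zero.2 hxnot, takeWhile_eq_replicate]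
        simp
      have hnm : m ∉ collectRuns (xs.dropWhile (· == m)) :=
        fun h => hxnot (mem_of_mem_collectRuns _ _ h)
      simp only [List.mem_append, List.count_cons_self, hcx]
      constructor
      · rintro (h1 | h2)
        · split at h1
          · omega
          · simp at h1
        · exact absurd h2 hnm
      · intro hcnt; left; rw [if_pos (by omega)]; simp
    · have hctw : List.count m (xs.takeWhile (· == x)) = 0 := by
        rw [takeWhile_eq_replicate, List.count_replicate]
        simp [Ne.symm hmx]
      have hcc : List.count m (x :: xs) = List.count m (xs.dropWhile (· == x)) := by
        rw [List.count_cons_of_ne (Ne.symm hmx), hcount m, hctw, Nat.zero_add]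
      rw [hcc]
      simp only [List.mem_append, ← ihs]
      constructor
      · rintro (h1 | h2)
        · exfalso; revert h1; split <;> simp [hmx]
        · exact h2
      · exact Or.inr

-- scanning a sorted list yields a strictly increasing (hence nodup, sorted) list
theorem pairwise_collectRuns (s : List String) (hs : s.Pairwise (· ≤ ·)) :
    (collectRuns s).Pairwise (· < ·) := by
  induction s using collectRuns.induct with
  | case1 => simp [collectRuns]
  | case2 x xs ih =>
    have hle : ∀ z ∈ xs, x ≤ z := fun z hz => List.rel_of_pairwise_cons hs hz
    have hgt := lt_of_mem_dropWhile x xs hs.tail hle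
    have hsorted' : (xs.dropWhile (· == x)).Pairwise (· ≤ ·) :=
      hs.tail.sublist (List.dropWhile_sublist _)
    rw [collectRuns]
    apply List.pairwise_append.2
    refine ⟨?_, ih hsorted', ?_⟩
    · split <;> simp
    · intro a ha b hb
      have hbx := hgt b (mem_of_mem_collectRuns _ _ hb)
      split at ha <;> simp at ha
      subst ha; exact hbx

-- the two ways of building common_menu agree
theorem common_eq (L : List String) :
    PySem.List.sorted ((PySem.Dict.counter L).keys.foldl
        (fun acc menu => if 2 ≤ (PySem.Dict.counter L).getD menu 0 then acc ++ [menu] else acc) [])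
      (fun x => x) false
    = collectRuns (PySem.List.sorted L (fun x => x) false) := by
  rw [PySem.List.foldl_append_ite_eq_filter (fun menu => 2 ≤ (PySem.Dict.counter L).getD menu 0)]
  rw [List.nil_append, PySem.Dict.keys_counter]
  set f := List.filter (fun x => decide (2 ≤ (PySem.Dict.counter L).getD x 0)) (PySem.Set.ofList L) with hf
  have hsortL : (PySem.List.sorted L (fun x => x) false).Pairwise (· ≤ ·) :=
    PySem.List.sorted_pairwise L (fun x => x)
  have hmemf : ∀ m, m ∈ f ↔ 2 ≤ L.count m := by
    intro m
    rw [hf, List.mem_filter]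
    simp only [PySem.Set.mem_ofList, PySem.Dict.getD_counter, decide_eq_true_eq]
    constructor
    · rintro ⟨_, h⟩; exact_mod_cast h
    · intro h
      refine ⟨List.count_pos_iff.1 (by omega), by exact_mod_cast h⟩
  have hnodupf : f.Nodup := (PySem.Set.nodup_ofList L).filter _
  have hpairR := pairwise_collectRuns _ hsortL
  apply PySem.List.eq_of_perm_of_pairwise_le_of_injective (fun x : String => x) (fun a b h => h)
  · rw [List.perm_ext_iff_of_nodup]
    · intro m
      rw [(PySem.List.sorted_perm f (fun x => x) false).mem_iff, hmemf m,
        mem_collectRuns _ hsortL m, (PySem.List.sorted_perm L (fun x => x) false).count_eq]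
    · exact ((PySem.List.sorted_perm f (fun x => x) false).nodup_iff).2 hnodupf
    · exact hpairR.imp ne_of_lt
  · exact PySem.List.sorted_pairwise f (fun x => x)
  · exact hpairR.imp le_of_lt

-- modify at a key different from the head passes the head through
theorem modify_cons_of_ne {ν : Type} (p : Int × ν) (t : List (Int × ν)) (k : Int) (d0 : ν)
    (F : ν → ν) (hk : k ≠ p.1) :
    PySem.Dict.modify (PySem.Dict.mk (p :: t)) k d0 F
      = PySem.Dict.mk (p :: (PySem.Dict.modify (PySem.Dict.mk t) k d0 F).items) := by
  obtain ⟨k0, v0⟩ := p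
  have hk0 : k0 ≠ k := by simpa using Ne.symm hk
  have h1 : (k0 == k) = false := by simpa using hk0
  have h2 : PySem.Dict.getD (PySem.Dict.mk ((k0, v0) :: t)) k d0 = PySem.Dict.getD (PySem.Dict.mk t) k d0 := by
    simp only [PySem.Dict.getD, PySem.Dict.get?_mk_cons, h1]
    simp
  simp only [PySem.Dict.modify, PySem.Dict.insert, PySem.Dict.contains, h2]
  simp only [List.any_cons, h1, Bool.false_or, List.map_cons]
  split <;> simp [hk0]

-- modify at the head key rewrites the head value (tail free of the key)
theorem modify_cons_self {ν : Type} (k : Int) (v : ν) (t : List (Int × ν)) (d0 : ν)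
    (F : ν → ν) (hk : k ∉ t.map Prod.fst) :
    PySem.Dict.modify (PySem.Dict.mk ((k, v) :: t)) k d0 F = PySem.Dict.mk ((k, F v) :: t) := by
  have hgd : PySem.Dict.getD (PySem.Dict.mk ((k, v) :: t)) k d0 = v := by
    simp only [PySem.Dict.getD, PySem.Dict.get?_mk_cons, BEq.rfl]
    simp
  have hmap : ∀ q ∈ t, q.1 ≠ k := by
    intro q hq h; exact hk (h ▸ List.mem_map_of_mem hq)
  simp only [PySem.Dict.modify, PySem.Dict.insert, PySem.Dict.contains, hgd]
  simp only [List.any_cons, BEq.rfl, Bool.true_or, if_pos rfl, List.map_cons]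
  have ht : List.map (fun p => if p.1 = k then (k, F v) else p) t = t := by
    rw [List.map_congr_left (g := id) (fun q hq => by simp [hmap q hq]), List.map_id]
  simp [ht]

theorem foldl_modify_cons {ν : Type} (ks : List Int) (p : Int × ν) (t : List (Int × ν)) (d0 : ν)
    (F : Int → ν → ν) (h : ∀ k ∈ ks, k ≠ p.1) :
    (ks.foldl (fun d k => PySem.Dict.modify d k d0 (F k)) (PySem.Dict.mk (p :: t))).items
      = p :: (ks.foldl (fun d k => PySem.Dict.modify d k d0 (F k)) (PySem.Dict.mk t)).items := by
  induction ks generalizing t with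
  | nil => simp
  | cons a ks ih =>
    simp only [List.foldl_cons]
    rw [modify_cons_of_ne p t a d0 (F a) (h a List.mem_cons_self)]
    exact ih _ (fun k hk => h k (List.mem_cons_of_mem _ hk))

-- the whole key loop is a map over the association list when keys are distinct
theorem foldl_modify_eq_map {ν : Type} (l : List (Int × ν)) (d0 : ν) (F : Int → ν → ν)
    (h : (l.map Prod.fst).Nodup) :
    ((l.map Prod.fst).foldl (fun d k => PySem.Dict.modify d k d0 (F k)) (PySem.Dict.mk l)).items
      = l.map (fun p => (p.1, F p.1 p.2)) := by
  induction l with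
  | nil => simp
  | cons p t ih =>
    obtain ⟨k, v⟩ := p
    simp only [List.map_cons, List.foldl_cons]
    have hnin : k ∉ t.map Prod.fst := by simpa using (List.nodup_cons.1 h).1
    rw [modify_cons_self k v t d0 (F k) hnin]
    rw [foldl_modify_cons _ _ _ _ _ (fun k' hk' => by rintro rfl; exact hnin hk')]
    rw [ih (List.nodup_cons.1 h).2]

-- ===== VERDICT (by name: the statement is the Claim_ definition above) =====
theorem order2course_spec : Claim_equal_order2course := by
  intro idx_list orders course_dict _hdom hpre
  obtain ⟨_hidx, hnodup, _hkeys⟩ := hpre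
  unfold Spec_order2course order2course order2course_alt
  simp only [PySem.List.foldl_append_eq_flatMap, List.nil_append, common_eq]
  set C := collectRuns (PySem.List.sorted (idx_list.flatMap (fun idx => (PySem.List.pyGet? orders idx).getD [])) (fun x => x) false) with hC
  rcases Nat.lt_or_ge C.length 2 with hlt | hge
  · rw [if_neg (by omega), if_pos hlt]
  · rw [if_pos hge, if_neg (by omega), PySem.Dict.keys_mk]
    exact foldl_modify_eq_map course_dict [] (fun k v => v ++ PySem.List.combinations C k.toNat) hnodup
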